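-- pv_equiv track=rewrite | github.com/umass-ml4ed/sim-student-eval | sim_student/annotate.py | fill_over_idxs
-- ===== SOURCE A (Python) =====
-- from typing import List, Optional
--
-- def fill_over_idxs(idx_lists: List[List[int]], prompts: List[str], results: List[str], annotations: list, data_size: int):
--     prompts_exp = [None] * data_size
--     results_exp = [None] * data_size
--     annotations_exp = [None] * data_size
--     for outer_idx, indices in enumerate(idx_lists):
--         for idx in indices:
--             prompts_exp[idx] = prompts[outer_idx]
--             results_exp[idx] = results[outer_idx]
--             annotations_exp[idx] = annotations[outer_idx]
--     return prompts_exp, results_exp, annotations_exp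
-- ===== SOURCE B (Python) =====
-- from typing import List, Optional
--
-- def fill_over_idxs(idx_lists: List[List[int]], prompts: List[str], results: List[str], annotations: list, data_size: int):
--     # Pass 1: inverse-index table -- owner[i] = index of the (last) idx_list containing i.
--     owner = [None] * data_size
--     for outer_idx, indices in enumerate(idx_lists):
--         for idx in indices:
--             owner[idx] = outer_idx
--     # Pass 2: project the table through each of the three row lists.
--     prompts_exp = [None if o is None else prompts[o] for o in owner]
--     results_exp = [None if o is None else results[o] for o in owner]
--     annotations_exp = [None if o is None else annotations[o] for o in owner]
--     return prompts_exp, results_exp, annotations_exp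
-- ===== Notes on version B (the rewrite author's own statement) =====
-- stated objective: alternative
-- what changed: Replaces the scatter of three parallel lists inside the nested loop by building a single inverse-index owner table in one pass and then projecting it through prompts/results/annotations in a second pass.
import Mathlib
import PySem

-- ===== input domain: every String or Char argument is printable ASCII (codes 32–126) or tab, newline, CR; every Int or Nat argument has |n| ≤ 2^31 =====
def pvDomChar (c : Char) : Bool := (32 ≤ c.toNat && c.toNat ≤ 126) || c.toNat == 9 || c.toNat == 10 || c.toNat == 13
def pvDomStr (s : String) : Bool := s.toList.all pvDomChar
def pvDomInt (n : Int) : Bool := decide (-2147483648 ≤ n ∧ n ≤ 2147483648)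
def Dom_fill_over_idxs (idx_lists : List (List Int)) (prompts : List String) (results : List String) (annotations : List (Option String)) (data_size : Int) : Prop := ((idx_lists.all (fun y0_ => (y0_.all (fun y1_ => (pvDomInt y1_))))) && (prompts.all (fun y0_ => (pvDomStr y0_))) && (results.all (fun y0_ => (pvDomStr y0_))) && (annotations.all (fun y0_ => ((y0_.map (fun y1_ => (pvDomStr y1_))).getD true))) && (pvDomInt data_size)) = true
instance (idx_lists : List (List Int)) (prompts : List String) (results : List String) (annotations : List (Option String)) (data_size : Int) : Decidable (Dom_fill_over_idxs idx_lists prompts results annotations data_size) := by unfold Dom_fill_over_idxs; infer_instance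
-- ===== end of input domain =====

-- B replaces A's nested scatter into three parallel lists by one inverse-index
-- ("owner") table built in a single pass and then projected through the three row
-- lists; same cost, different decomposition (objective: alternative).

-- ===== PORT A =====
def fill_over_idxs (idx_lists : List (List Int)) (prompts : List String) (results : List String) (annotations : List (Option String)) (data_size : Int) : List (Option String) × List (Option String) × List (Option String) :=
  let prompts_exp : List (Option String) := List.replicate data_size.toNat none
  let results_exp : List (Option String) := List.replicate data_size.toNat none
  let annotations_exp : List (Option String) := List.replicate data_size.toNat none
  (PySem.List.enumerate idx_lists).foldl
    (fun st pr =>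
      pr.2.foldl
        (fun st idx =>
          (PySem.List.pySetD st.1 idx (some (PySem.List.pyGetD prompts pr.1 "")),
           PySem.List.pySetD st.2.1 idx (some (PySem.List.pyGetD results pr.1 "")),
           PySem.List.pySetD st.2.2 idx (PySem.List.pyGetD annotations pr.1 none)))
        st)
    (prompts_exp, results_exp, annotations_exp)

-- ===== PORT B =====
def fill_over_idxs_alt (idx_lists : List (List Int)) (prompts : List String) (results : List String) (annotations : List (Option String)) (data_size : Int) : List (Option String) × List (Option String) × List (Option String) :=
  let owner : List (Option Int) :=
    (PySem.List.enumerate idx_lists).foldl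
      (fun ow pr => pr.2.foldl (fun ow idx => PySem.List.pySetD ow idx (some pr.1)) ow)
      (List.replicate data_size.toNat none)
  (owner.map (fun o => o.map (fun j => PySem.List.pyGetD prompts j "")),
   owner.map (fun o => o.map (fun j => PySem.List.pyGetD results j "")),
   owner.map (fun o => o.bind (fun j => PySem.List.pyGetD annotations j none)))

-- ===== PRECONDITION & SPEC =====
-- Pre_ excludes exactly the inputs where the Python A raises IndexError: some scatter
-- index outside the target range [-data_size, data_size), or a nonempty index list at a
-- position beyond prompts/results/annotations.
def Pre_fill_over_idxs (idx_lists : List (List Int)) (prompts : List String) (results : List String) (annotations : List (Option String)) (data_size : Int) : Prop :=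
  ∀ pr ∈ PySem.List.enumerate idx_lists,
    (pr.2 ≠ [] → pr.1 < (prompts.length : Int) ∧ pr.1 < (results.length : Int) ∧ pr.1 < (annotations.length : Int)) ∧
    ∀ idx ∈ pr.2, -((data_size.toNat : Int)) ≤ idx ∧ idx < (data_size.toNat : Int)
instance (idx_lists : List (List Int)) (prompts : List String) (results : List String) (annotations : List (Option String)) (data_size : Int) : Decidable (Pre_fill_over_idxs idx_lists prompts results annotations data_size) := by unfold Pre_fill_over_idxs; infer_instance
def pvWitness_fill_over_idxs : List (List Int) × List String × List String × List (Option String) × Int :=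
  ([[0, 2], [1]], ["a", "b"], ["x", "y"], [some "u", none], 3)
def Spec_fill_over_idxs (idx_lists : List (List Int)) (prompts : List String) (results : List String) (annotations : List (Option String)) (data_size : Int) (out : List (Option String) × List (Option String) × List (Option String)) : Prop := out = fill_over_idxs_alt idx_lists prompts results annotations data_size
instance (idx_lists : List (List Int)) (prompts : List String) (results : List String) (annotations : List (Option String)) (data_size : Int) (out : List (Option String) × List (Option String) × List (Option String)) : Decidable (Spec_fill_over_idxs idx_lists prompts results annotations data_size out) := by unfold Spec_fill_over_idxs; infer_instance

-- ===== CLAIM (what is proved, stated in full; the proofs are below) =====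
def Claim_equal_fill_over_idxs : Prop := ∀ (idx_lists : List (List Int)) (prompts : List String) (results : List String) (annotations : List (Option String)) (data_size : Int), Dom_fill_over_idxs idx_lists prompts results annotations data_size → Pre_fill_over_idxs idx_lists prompts results annotations data_size → Spec_fill_over_idxs idx_lists prompts results annotations data_size (fill_over_idxs idx_lists prompts results annotations data_size)

-- ===== LEMMAS AND PROOFS =====

-- the projection of the owner table through the three row lists
def pvProj (prompts : List String) (results : List String) (annotations : List (Option String)) (ow : List (Option Int)) : List (Option String) × List (Option String) × List (Option String) :=
  (ow.map (fun o => o.map (fun j => PySem.List.pyGetD prompts j "")),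
   ow.map (fun o => o.map (fun j => PySem.List.pyGetD results j "")),
   ow.map (fun o => o.bind (fun j => PySem.List.pyGetD annotations j none)))

-- total item-assignment commutes with List.map
theorem pv_map_pySetD {α β : Type} (f : α → β) (xs : List α) (i : Int) (v : α) :
    (PySem.List.pySetD xs i v).map f = PySem.List.pySetD (xs.map f) i (f v) := by
  simp only [PySem.List.pySetD, PySem.List.pySet?, PySem.List.pyIdx?, List.length_map]
  split <;> split <;> simp [List.map_set]

-- a fold whose step commutes with an abstraction map lifts through it
theorem pv_foldl_lift {α β γ : Type} (f : α → β) (F : β → γ → β) (G : α → γ → α)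
    (h : ∀ a c, F (f a) c = f (G a c)) (l : List γ) (a : α) :
    l.foldl F (f a) = f (l.foldl G a) := by
  induction l generalizing a with
  | nil => rfl
  | cons c l ih => simp only [List.foldl_cons, h]; exact ih _

-- A's nested scatter is the owner fold, projected
theorem pv_main (prompts : List String) (results : List String) (annotations : List (Option String)) (idx_lists : List (List Int)) (n : Nat) :
    (PySem.List.enumerate idx_lists).foldl
      (fun st pr => pr.2.foldl (fun st idx =>
          (PySem.List.pySetD st.1 idx (some (PySem.List.pyGetD prompts pr.1 "")),
           PySem.List.pySetD st.2.1 idx (some (PySem.List.pyGetD results pr.1 "")),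
           PySem.List.pySetD st.2.2 idx (PySem.List.pyGetD annotations pr.1 none))) st)
      (List.replicate n none, List.replicate n none, List.replicate n none)
    = pvProj prompts results annotations
        ((PySem.List.enumerate idx_lists).foldl
          (fun ow pr => pr.2.foldl (fun ow idx => PySem.List.pySetD ow idx (some pr.1)) ow)
          (List.replicate n none)) := by
  have hinit : ((List.replicate n (none : Option String), List.replicate n (none : Option String), List.replicate n (none : Option String)) : List (Option String) × List (Option String) × List (Option String)) = pvProj prompts results annotations (List.replicate n none) := by
    simp [pvProj]
  rw [hinit]
  refine pv_foldl_lift (pvProj prompts results annotations) _ _ (fun ow pr => ?_) _ _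
  refine pv_foldl_lift (pvProj prompts results annotations) _ _ (fun ow idx => ?_) _ _
  simp [pvProj, pv_map_pySetD]

theorem fill_over_idxs_eq_alt (idx_lists : List (List Int)) (prompts : List String) (results : List String) (annotations : List (Option String)) (data_size : Int) :
    fill_over_idxs idx_lists prompts results annotations data_size = fill_over_idxs_alt idx_lists prompts results annotations data_size := by
  unfold fill_over_idxs fill_over_idxs_alt
  rw [pv_main prompts results annotations idx_lists data_size.toNat]
  rfl

-- ===== VERDICT (by name: the statement is the Claim_ definition above) =====
theorem fill_over_idxs_spec : Claim_equal_fill_over_idxs := by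
  intro idx_lists prompts results annotations data_size _ _
  unfold Spec_fill_over_idxs
  exact fill_over_idxs_eq_alt idx_lists prompts results annotations data_size
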